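-- pv_equiv track=rewrite | github.com/elchuzade/sudoku | sudoku.py | find_row_pos_values
-- ===== SOURCE A (Python) =====
-- def find_row_pos_values(row_pos_values):
--     result = []
--     for i in range(9):
--         sub_result = []
--         i += 1
--         count = 0
--         for j in range(len(row_pos_values)):
--             if i in row_pos_values[j]:
--                 count += 1
--         sub_result.append(i)
--         sub_result.append(count)
--         result.append(sub_result)
--     return result
-- ===== SOURCE B (Python) =====
-- def find_row_pos_values(row_pos_values):
--     counts = {}
--     for sub in row_pos_values:
--         for v in set(sub):
--             if 1 <= v <= 9:
--                 counts[v] = counts.get(v, 0) + 1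
--     return [[i, counts.get(i, 0)] for i in range(1, 10)]
-- ===== Notes on version B (the rewrite author's own statement) =====
-- stated objective: faster
-- what changed: One accumulation pass building a counts dict over the distinct 1-9 values of each sublist, then nine O(1) lookups, instead of nine full rescans of all sublists with a membership test each.
import Mathlib
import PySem

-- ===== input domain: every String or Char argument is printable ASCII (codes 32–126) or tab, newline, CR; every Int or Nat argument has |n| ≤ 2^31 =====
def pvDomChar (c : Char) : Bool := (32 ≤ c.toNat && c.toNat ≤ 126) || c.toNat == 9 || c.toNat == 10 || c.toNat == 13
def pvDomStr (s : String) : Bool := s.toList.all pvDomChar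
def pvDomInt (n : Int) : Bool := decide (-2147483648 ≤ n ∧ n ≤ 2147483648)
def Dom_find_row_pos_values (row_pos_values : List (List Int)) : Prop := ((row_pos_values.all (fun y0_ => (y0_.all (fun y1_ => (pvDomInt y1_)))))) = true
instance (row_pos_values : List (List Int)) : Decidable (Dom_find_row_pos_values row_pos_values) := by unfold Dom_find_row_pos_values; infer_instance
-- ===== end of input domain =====

-- B replaces A's nine full rescans with one counting pass over the sublists plus nine dict lookups.


-- ===== PORT A =====
-- for i in range(9): i += 1; count = Σ_j [i in row_pos_values[j]]; result.append([i, count])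
def find_row_pos_values (row_pos_values : List (List Int)) : List (List Int) :=
  (PySem.List.pyRange 0 9 1).foldl (fun result i0 =>
    let i := i0 + 1
    let count : Int :=
      (PySem.List.pyRange 0 (row_pos_values.length : Int) 1).foldl
        (fun c j => if i ∈ PySem.List.pyGetD row_pos_values j [] then c + 1 else c) 0
    result ++ [[i, count]]) []

-- ===== PORT B =====
-- counts = {}; for sub: for v in set(sub): if 1<=v<=9: counts[v] += 1; then [[i, counts.get(i,0)] for i in 1..9]
def find_row_pos_values_alt (row_pos_values : List (List Int)) : List (List Int) :=
  let counts : PySem.Dict Int Int :=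
    row_pos_values.foldl (fun d sub =>
      (PySem.Set.ofList sub).foldl (fun d v =>
        if 1 ≤ v ∧ v ≤ 9 then d.modify v 0 (· + 1) else d) d) PySem.Dict.empty
  (PySem.List.pyRange 1 10 1).map (fun i => [i, counts.getD i 0])

-- ===== PRECONDITION & SPEC =====
def Spec_find_row_pos_values (row_pos_values : List (List Int)) (out : List (List Int)) : Prop := out = find_row_pos_values_alt row_pos_values
instance (row_pos_values : List (List Int)) (out : List (List Int)) : Decidable (Spec_find_row_pos_values row_pos_values out) := by unfold Spec_find_row_pos_values; infer_instance

-- ===== CLAIM (what is proved, stated in full; the proofs are below) =====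
def Claim_equal_find_row_pos_values : Prop := ∀ (row_pos_values : List (List Int)), Dom_find_row_pos_values row_pos_values → Spec_find_row_pos_values row_pos_values (find_row_pos_values row_pos_values)

-- ===== LEMMAS AND PROOFS =====

-- inner fold of B over a duplicate-free list bumps d.getD i 0 by 1 exactly when i is in it and in 1..9
theorem inner_fold_getD (s : List Int) (hs : s.Nodup) (d : PySem.Dict Int Int) (i : Int)
    (hi : 1 ≤ i ∧ i ≤ 9) :
    (s.foldl (fun d v => if 1 ≤ v ∧ v ≤ 9 then d.modify v 0 (· + 1) else d) d).getD i 0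
      = d.getD i 0 + (if i ∈ s then 1 else 0) := by
  induction s generalizing d with
  | nil => simp
  | cons v rest ih =>
    simp only [List.foldl_cons]
    rcases List.nodup_cons.mp hs with ⟨hv, hrest⟩
    by_cases hvi : v = i
    · subst hvi
      rw [if_pos hi, ih hrest, PySem.Dict.getD_modify_self]
      simp [hv]
    · have : ((if 1 ≤ v ∧ v ≤ 9 then d.modify v 0 (· + 1) else d) : PySem.Dict Int Int).getD i 0
          = d.getD i 0 := by
        split_ifs with h
        · exact PySem.Dict.getD_modify_of_ne d 0 _ (Ne.symm hvi)
        · rfl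
      rw [ih hrest, this]
      simp [List.mem_cons, Ne.symm hvi]

-- the counts dict of B counts, for each i in 1..9, the sublists containing i
theorem counts_getD (rpv : List (List Int)) (d : PySem.Dict Int Int) (i : Int)
    (hi : 1 ≤ i ∧ i ≤ 9) :
    (rpv.foldl (fun d sub =>
        (PySem.Set.ofList sub).foldl (fun d v =>
          if 1 ≤ v ∧ v ≤ 9 then d.modify v 0 (· + 1) else d) d) d).getD i 0
      = d.getD i 0 + (rpv.countP (fun sub => decide (i ∈ sub)) : Int) := by
  induction rpv generalizing d with
  | nil => simp
  | cons sub rest ih =>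
    simp only [List.foldl_cons, List.countP_cons]
    rw [ih, inner_fold_getD _ (PySem.Set.nodup_ofList sub) d i hi]
    have : (i ∈ PySem.Set.ofList sub) ↔ i ∈ sub := PySem.Set.mem_ofList sub i
    by_cases h : i ∈ sub <;> simp [this, h] <;> ring

-- A's inner loop over indices is the countP of sublists containing i
theorem a_count (rpv : List (List Int)) (i : Int) :
    (PySem.List.pyRange 0 (rpv.length : Int) 1).foldl
        (fun c j => if i ∈ PySem.List.pyGetD rpv j [] then c + 1 else c) (0 : Int)
      = (rpv.countP (fun sub => decide (i ∈ sub)) : Int) := by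
  rw [PySem.List.foldl_pyRange_zero_pyGetD' rpv [] (fun c sub => if i ∈ sub then c + 1 else c) 0,
      PySem.List.foldl_ite_add_one]
  simp

-- ===== VERDICT (by name: the statement is the Claim_ definition above) =====
theorem find_row_pos_values_spec : Claim_equal_find_row_pos_values := by
  intro rpv _
  show find_row_pos_values rpv = find_row_pos_values_alt rpv
  unfold find_row_pos_values find_row_pos_values_alt
  rw [PySem.List.foldl_append_singleton_eq_map]
  have hr9 : PySem.List.pyRange 0 9 1 = [0,1,2,3,4,5,6,7,8] := by decide
  have hr10 : PySem.List.pyRange 1 10 1 = [1,2,3,4,5,6,7,8,9] := by decide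
  rw [hr9, hr10]
  simp only [List.map, List.nil_append]
  have key : ∀ i : Int, 1 ≤ i ∧ i ≤ 9 →
      (PySem.List.pyRange 0 (rpv.length : Int) 1).foldl
          (fun c j => if i ∈ PySem.List.pyGetD rpv j [] then c + 1 else c) (0 : Int)
        = (rpv.foldl (fun d sub =>
            (PySem.Set.ofList sub).foldl (fun d v =>
              if 1 ≤ v ∧ v ≤ 9 then d.modify v 0 (· + 1) else d) d) PySem.Dict.empty).getD i 0 := by
    intro i hi
    rw [a_count, counts_getD rpv PySem.Dict.empty i hi,
      show (PySem.Dict.empty : PySem.Dict Int Int).getD i 0 = 0 from rfl, zero_add]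
  norm_num [key 1 (by omega), key 2 (by omega), key 3 (by omega), key 4 (by omega),
    key 5 (by omega), key 6 (by omega), key 7 (by omega), key 8 (by omega), key 9 (by omega)]
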